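-- pv_equiv track=rewrite | github.com/abusse/evm-perf | core/benchmark.py | split_code
-- ===== SOURCE A (Python) =====
-- def split_code(code: str):
--     head_block = ""
--     current = ""
--
--     for line in code.splitlines(keepends=True):
--         if '// #START-ITER' in line:
--             head_block = current
--             current = ""
--             continue
--         if not line.startswith('//'):
--             current += line
--
--     return head_block, current + "\n"
-- ===== SOURCE B (Python) =====
-- def split_code(code: str):
--     MARK = '// #START-ITER'
--
--     def block_until_marker(it):
--         # consume lines from the shared reverse iterator until a marker line;
--         # return (joined non-comment lines in original order, marker seen?)
--         parts = []
--         for line in it: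
--             if MARK in line:
--                 return ''.join(reversed(parts)), True
--             if not line.startswith('//'):
--                 parts.append(line)
--         return ''.join(reversed(parts)), False
--
--     it = reversed(code.splitlines(keepends=True))
--     current, found = block_until_marker(it)
--     head = block_until_marker(it)[0] if found else ''
--     return head, current + '\n'
-- ===== Notes on version B (the rewrite author's own statement) =====
-- stated objective: alternative
-- what changed: Replaces A's single forward accumulate-and-flush pass (two running strings, head overwritten at every marker line) with a backwards scan from the end of the file: collect the block after the last marker line, then, only if a marker was seen, collect one more block back to the previous marker; lines before the penultimate marker are never joined.
import Mathlib
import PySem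

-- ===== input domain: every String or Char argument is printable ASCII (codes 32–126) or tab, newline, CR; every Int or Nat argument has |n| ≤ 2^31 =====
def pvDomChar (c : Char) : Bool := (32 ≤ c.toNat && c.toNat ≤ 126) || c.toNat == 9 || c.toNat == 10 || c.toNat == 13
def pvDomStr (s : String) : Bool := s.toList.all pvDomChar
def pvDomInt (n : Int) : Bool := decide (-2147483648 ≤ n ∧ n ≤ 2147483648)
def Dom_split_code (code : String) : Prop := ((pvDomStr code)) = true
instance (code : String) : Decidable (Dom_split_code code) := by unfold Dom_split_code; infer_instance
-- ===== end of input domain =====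

-- B scans the lines backwards from the end instead of accumulating forwards; same return value, no speed claim.

-- hand-ported str.splitlines(keepends=True), shared by both ports (both Pythons call it);
-- exact on the Dom_split_code domain, whose only line-break characters are '\n', '\r' and '\r\n'
def pvSplitKeep : List Char → List Char → List (List Char)
  | [], acc => if acc.isEmpty then [] else [acc]
  | '\r' :: '\n' :: rest, acc => (acc ++ ['\r', '\n']) :: pvSplitKeep rest []
  | '\n' :: rest, acc => (acc ++ ['\n']) :: pvSplitKeep rest []
  | '\r' :: rest, acc => (acc ++ ['\r']) :: pvSplitKeep rest []
  | c :: rest, acc => pvSplitKeep rest (acc ++ [c])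

-- ===== PORT A =====
-- one iteration of A's for-loop over the state (head_block, current)
def pvStepA (st : List Char × List Char) (line : List Char) : List Char × List Char :=
  if PySem.Chars.isIn "// #START-ITER".toList line then (st.2, [])
  else if PySem.Chars.startswith line "//".toList then st
  else (st.1, st.2 ++ line)

def split_code (code : String) : String × String :=
  let r := (pvSplitKeep code.toList []).foldl pvStepA ([], [])
  (String.mk r.1, String.mk (r.2 ++ ['\n']))

-- ===== PORT B =====
-- Source B's block_until_marker; the shared reverse iterator is modelled as the remaining
-- list of lines (returned as the second component), the marker flag as the third
def pvBlockUntilMarker : List (List Char) → List (List Char) → List Char × List (List Char) × Bool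
  | [], parts => (PySem.Chars.join [] parts.reverse, [], false)
  | line :: rest, parts =>
      if PySem.Chars.isIn "// #START-ITER".toList line then
        (PySem.Chars.join [] parts.reverse, rest, true)
      else if PySem.Chars.startswith line "//".toList then
        pvBlockUntilMarker rest parts
      else
        pvBlockUntilMarker rest (parts ++ [line])

def split_code_alt (code : String) : String × String :=
  let it := (pvSplitKeep code.toList []).reverse
  let r1 := pvBlockUntilMarker it []
  let head := if r1.2.2 then (pvBlockUntilMarker r1.2.1 []).1 else []
  (String.mk head, String.mk (r1.1 ++ ['\n']))

-- ===== PRECONDITION & SPEC =====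
def Spec_split_code (code : String) (out : String × String) : Prop := out = split_code_alt code
instance (code : String) (out : String × String) : Decidable (Spec_split_code code out) := by unfold Spec_split_code; infer_instance

-- ===== CLAIM (what is proved, stated in full; the proofs are below) =====
def Claim_equal_split_code : Prop := ∀ (code : String), Dom_split_code code → Spec_split_code code (split_code code)

-- ===== LEMMAS AND PROOFS =====

lemma pvJoinNil (l : List (List Char)) : PySem.Chars.join [] l = l.flatten := by
  simp only [PySem.Chars.join, List.intercalate]
  induction l with
  | nil => rfl
  | cons a t ih =>
      cases t with
      | nil => simp
      | cons b u => simpa using ih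

-- B's first block is A's running `current` (processing the lines of `rev` from the back),
-- followed by the already collected `parts`
lemma pvKey1 (rev : List (List Char)) :
    ∀ (h : List Char) (parts : List (List Char)),
      (pvBlockUntilMarker rev parts).1
        = (rev.foldr (fun x y => pvStepA y x) (h, [])).2 ++ parts.reverse.flatten := by
  induction rev with
  | nil => intro h parts; simp [pvBlockUntilMarker, pvJoinNil]
  | cons line rest ih =>
      intro h parts
      simp only [pvBlockUntilMarker, List.foldr_cons]
      rw [pvStepA]
      by_cases hm : PySem.Chars.isIn "// #START-ITER".toList line = true
      · rw [if_pos hm, if_pos hm]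
        simp [pvJoinNil]
      · by_cases hc : PySem.Chars.startswith line "//".toList = true
        · rw [if_neg hm, if_neg hm, if_pos hc, if_pos hc]
          exact ih h parts
        · rw [if_neg hm, if_neg hm, if_neg hc, if_neg hc]
          rw [ih h (parts ++ [line])]
          simp

-- A's final head_block is B's second collected block when a marker was seen, else the initial one
lemma pvKey2 (rev : List (List Char)) :
    ∀ (h : List Char) (parts : List (List Char)),
      (rev.foldr (fun x y => pvStepA y x) (h, [])).1
        = (if (pvBlockUntilMarker rev parts).2.2
           then (pvBlockUntilMarker (pvBlockUntilMarker rev parts).2.1 []).1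
           else h) := by
  induction rev with
  | nil => intro h parts; simp [pvBlockUntilMarker]
  | cons line rest ih =>
      intro h parts
      simp only [pvBlockUntilMarker, List.foldr_cons]
      rw [pvStepA]
      by_cases hm : PySem.Chars.isIn "// #START-ITER".toList line = true
      · rw [if_pos hm, if_pos hm]
        rw [pvKey1 rest h ([] : List (List Char))]
        simp
      · by_cases hc : PySem.Chars.startswith line "//".toList = true
        · rw [if_neg hm, if_neg hm, if_pos hc, if_pos hc]
          exact ih h parts
        · rw [if_neg hm, if_neg hm, if_neg hc, if_neg hc]
          exact ih h (parts ++ [line])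

-- ===== VERDICT (by name: the statement is the Claim_ definition above) =====
theorem split_code_spec : Claim_equal_split_code := by
  intro code _
  unfold Spec_split_code split_code split_code_alt
  have hf : (pvSplitKeep code.toList []).foldl pvStepA ([], [])
      = (pvSplitKeep code.toList []).reverse.foldr (fun x y => pvStepA y x) ([], []) := by
    rw [List.foldr_reverse]
  refine Prod.ext ?_ ?_
  · simp only [hf]
    rw [pvKey2 (pvSplitKeep code.toList []).reverse [] []]
  · simp only [hf]
    rw [pvKey1 (pvSplitKeep code.toList []).reverse [] []]
    simp
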